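-- pv_equiv track=rewrite | github.com/SelvitaDrugDiscovery/JANUS | rings_filters/rings.py | _canon_ring
-- ===== SOURCE A (Python) =====
-- def _canon_ring(s: str):
--     """
--     Transforms cyclical list of atoms to canonical view. Puts the letter with max char value in the
--     beginning of the ring string. If two letters identical, compares next to them and so on,
--     until differences occur.
--     Examples:
--         'cncc' -> 'nccc'
--         'cnocc' -> 'occcn'
--         'cncnnc' -> 'nnccnc'
--
--     :param s: cyclical list of ring strings, ex 'ccnccc' for pyridine.
--     :return: canonical view of ring string, ex 'nccccc' for pyridine.
--     """
--
--     n = len(s)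
--     max_idx = 0
--
--     # main loop
--     for i in range(1, n):
--         j = 0
--         # find max letter over whole cyclic s
--         while j < n:
--             # cyclical index
--             idx = (i + j) % n
--             m_idx = (max_idx + j) % n
--
--             if s[idx] > s[m_idx]:
--                 max_idx = i
--                 break
--             # compare next letters if multiple maximums
--             elif s[idx] == s[m_idx]:
--                 j += 1
--             else:
--                 break
--
--     return s[max_idx:] + s[:max_idx]
-- ===== SOURCE B (Python) =====
-- def _canon_ring(s: str):
--     # Idiomatic rewrite: the canonical ring is simply the lexicographically
--     # greatest rotation, so take max over all rotations directly.
--     return max((s[i:] + s[:i] for i in range(len(s))), default=s)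
-- ===== Notes on version B (the rewrite author's own statement) =====
-- stated objective: idiomatic
-- what changed: Replaces the hand-written tournament of cyclic index-by-index comparisons (nested loops with modular indexing and breaks) by a one-line built-in max over the explicitly built rotation strings.
import Mathlib
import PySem

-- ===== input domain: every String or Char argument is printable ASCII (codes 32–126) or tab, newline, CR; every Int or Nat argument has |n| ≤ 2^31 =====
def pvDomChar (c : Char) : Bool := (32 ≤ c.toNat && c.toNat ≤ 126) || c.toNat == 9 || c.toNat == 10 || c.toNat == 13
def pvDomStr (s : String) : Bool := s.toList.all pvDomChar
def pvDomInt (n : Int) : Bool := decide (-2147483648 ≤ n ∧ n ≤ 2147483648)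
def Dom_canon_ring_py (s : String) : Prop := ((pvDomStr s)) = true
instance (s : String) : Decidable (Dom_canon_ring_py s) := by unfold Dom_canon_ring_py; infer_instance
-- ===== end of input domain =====

-- B replaces A's hand-written tournament of cyclic index-by-index comparisons (nested
-- loops with modular indexing and breaks) by the idiomatic built-in max over all
-- explicitly built rotation strings; same cost class, plainer code.

-- ===== PORT A =====
-- inner `while j < n` loop of A; fuel = number of remaining loop passes (j increases
-- on every pass, so `n` passes always suffice and fuel 0 coincides with the failed
-- guard `j < n`); result = the new value of max_idx. String indexing is done on
-- s.toList with PySem.List.pyGet? (exact); the `none` branch is unreachable (the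
-- index is a remainder mod n) and returns m.
def aWhile (l : List Char) (n i : Int) (m : Int) : Nat → Int → Int
  | 0, _ => m
  | fuel + 1, j =>
    if j < n then
      match PySem.List.pyGet? l (PySem.Int.mod (i + j) n),
            PySem.List.pyGet? l (PySem.Int.mod (m + j) n) with
      | some a, some b =>
        if b < a then i                                 -- s[idx] > s[m_idx]: max_idx = i; break
        else if a = b then aWhile l n i m fuel (j + 1)  -- equal letters: j += 1
        else m                                          -- else: break
      | _, _ => m
    else m

def canon_ring_py (s : String) : String :=
  let l := s.toList
  let n : Int := PySem.List.len l
  let maxIdx := (PySem.List.pyRange 1 n 1).foldl (fun m i => aWhile l n i m n.toNat 0) 0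
  -- s[max_idx:] + s[:max_idx], taken on toList (exact for string slices/concatenation)
  String.ofList (PySem.List.slice l (some maxIdx) none ++ PySem.List.slice l none (some maxIdx))

-- ===== PORT B =====
-- max((s[i:] + s[:i] for i in range(len(s))), default=s); slices taken on toList (exact)
def canon_ring_py_alt (s : String) : String :=
  PySem.List.maxD
    ((PySem.List.pyRange 0 (PySem.List.len s.toList) 1).map
      (fun i => String.ofList (PySem.List.slice s.toList (some i) none
                                ++ PySem.List.slice s.toList none (some i))))
    (fun r => r) s

-- ===== PRECONDITION & SPEC =====
def Spec_canon_ring_py (s : String) (out : String) : Prop := out = canon_ring_py_alt s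
instance (s : String) (out : String) : Decidable (Spec_canon_ring_py s out) := by unfold Spec_canon_ring_py; infer_instance

-- ===== CLAIM (what is proved, stated in full; the proofs are below) =====
def Claim_equal_canon_ring_py : Prop := ∀ (s : String), Dom_canon_ring_py s → Spec_canon_ring_py s (canon_ring_py s)

-- ===== LEMMAS AND PROOFS =====

-- the rotation of l starting at index k
def rot (l : List Char) (k : Nat) : List Char := l.drop k ++ l.take k

-- strict lexicographic "greater" on equal-length lists, as A's inner loop computes it
def lexGT : List Char → List Char → Bool
  | a :: as, b :: bs => if b < a then true else if a = b then lexGT as bs else false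
  | _, _ => false

theorem rot_length (l : List Char) (k : Nat) : (rot l k).length = l.length := by
  simp [rot]; omega

theorem rot_getElem (l : List Char) (k j : Nat) (hk : k ≤ l.length) (hj : j < l.length) :
    (rot l k)[j]'(by simp [rot]; omega) = l[(k + j) % l.length]'(Nat.mod_lt _ (by omega)) := by
  unfold rot
  by_cases h : j < l.length - k
  · rw [List.getElem_append_left (by simpa using h)]
    have h2 : (k + j) % l.length = k + j := Nat.mod_eq_of_lt (by omega)
    simp only [List.getElem_drop]
    congr 1
    omega
  · rw [List.getElem_append_right (by simpa using h)]
    have h2 : (k + j) % l.length = k + j - l.length := by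
      rw [Nat.mod_eq_sub_mod (by omega)]
      exact Nat.mod_eq_of_lt (by omega)
    simp only [List.getElem_take]
    congr 1
    simp
    omega

theorem lexGT_iff (a b : List Char) (h : a.length = b.length) :
    lexGT a b = true ↔ b < a := by
  induction a generalizing b with
  | nil =>
    cases b with
    | nil => simp [lexGT]
    | cons y ys => simp at h
  | cons x xs ih =>
    cases b with
    | nil => simp at h
    | cons y ys =>
      simp only [lexGT, List.cons_lt_cons_iff]
      split_ifs with h1 h2
      · simp [h1]
      · have h' : xs.length = ys.length := by simpa using h
        rw [ih ys h']
        constructor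
        · intro hy; exact Or.inr ⟨h2.symm, hy⟩
        · rintro (hy | ⟨-, hy⟩)
          · exact absurd hy h1
          · exact hy
      · constructor
        · intro hf; cases hf
        · rintro (hy | ⟨hy, -⟩)
          · exact absurd hy h1
          · exact absurd hy.symm h2

-- A's inner loop from position j computes the strict lexicographic comparison of the
-- two rotations' suffixes from j
theorem aWhile_eq (l : List Char) (i' m' : Nat) (hi : i' < l.length) (hm : m' < l.length) :
    ∀ (fuel j' : Nat), l.length ≤ fuel + j' → j' ≤ l.length →
    aWhile l (l.length : Int) (i' : Int) (m' : Int) fuel (j' : Int) =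
      if lexGT ((rot l i').drop j') ((rot l m').drop j') then (i' : Int) else (m' : Int) := by
  intro fuel
  induction fuel with
  | zero =>
    intro j' h1 h2
    have hj : j' = l.length := by omega
    subst hj
    rw [List.drop_of_length_le (by rw [rot_length]), List.drop_of_length_le (by rw [rot_length])]
    simp [aWhile, lexGT]
  | succ fuel ih =>
    intro j' h1 h2
    by_cases hj : j' < l.length
    · have hcond : (j' : Int) < (l.length : Int) := by exact_mod_cast hj
      have hri : j' < (rot l i').length := by rw [rot_length]; exact hj
      have hrm : j' < (rot l m').length := by rw [rot_length]; exact hj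
      have hdi := List.drop_eq_getElem_cons hri
      have hdm := List.drop_eq_getElem_cons hrm
      rw [rot_getElem l i' j' (by omega) hj] at hdi
      rw [rot_getElem l m' j' (by omega) hj] at hdm
      have hgi : PySem.List.pyGet? l (PySem.Int.mod ((i' : Int) + (j' : Int)) (l.length : Int))
          = some (l[(i' + j') % l.length]'(Nat.mod_lt _ (by omega))) := by
        have : ((i' : Int) + (j' : Int)) = ((i' + j' : Nat) : Int) := by push_cast; ring
        rw [this, PySem.Int.mod_natCast, PySem.List.pyGet?_natCast,
          List.getElem?_eq_getElem (Nat.mod_lt _ (by omega))]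
      have hgm : PySem.List.pyGet? l (PySem.Int.mod ((m' : Int) + (j' : Int)) (l.length : Int))
          = some (l[(m' + j') % l.length]'(Nat.mod_lt _ (by omega))) := by
        have : ((m' : Int) + (j' : Int)) = ((m' + j' : Nat) : Int) := by push_cast; ring
        rw [this, PySem.Int.mod_natCast, PySem.List.pyGet?_natCast,
          List.getElem?_eq_getElem (Nat.mod_lt _ (by omega))]
      rw [aWhile, if_pos hcond, hgi, hgm]
      simp only [hdi, hdm]
      by_cases hlt : l[(m' + j') % l.length]'(Nat.mod_lt _ (by omega))
          < l[(i' + j') % l.length]'(Nat.mod_lt _ (by omega))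
      · simp [lexGT, hlt]
      · by_cases heq : l[(i' + j') % l.length]'(Nat.mod_lt _ (by omega))
            = l[(m' + j') % l.length]'(Nat.mod_lt _ (by omega))
        · have hc : (j' : Int) + 1 = ((j' + 1 : Nat) : Int) := by push_cast; ring
          simp only [lexGT, heq, hc, ih (j' + 1) (by omega) (by omega)]
          simp
        · simp [lexGT, hlt, heq]
    · have hj' : j' = l.length := by omega
      subst hj'
      have hcond : ¬ ((l.length : Int) < (l.length : Int)) := by omega
      rw [aWhile, if_neg hcond]
      rw [List.drop_of_length_le (by rw [rot_length]), List.drop_of_length_le (by rw [rot_length])]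
      simp [lexGT]

-- one full inner loop = "replace m by i iff rotation i beats rotation m"
theorem aWhile_step (l : List Char) (i' m' : Nat) (hi : i' < l.length) (hm : m' < l.length) :
    aWhile l (l.length : Int) (i' : Int) (m' : Int) l.length 0 =
      if rot l m' < rot l i' then (i' : Int) else (m' : Int) := by
  have h0 : ((0 : Nat) : Int) = (0 : Int) := by simp
  have := aWhile_eq l i' m' hi hm l.length 0 (by omega) (by omega)
  rw [h0] at this
  rw [this]
  simp only [List.drop_zero]
  by_cases h : rot l m' < rot l i'
  · rw [if_pos ((lexGT_iff _ _ (by rw [rot_length, rot_length])).mpr h), if_pos h]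
  · rw [if_neg (by simp only [lexGT_iff _ _ (by rw [rot_length, rot_length] :
      (rot l i').length = (rot l m').length)]; exact h), if_neg h]

-- the outer fold keeps a running arg-max of the rotations
theorem fold_argmax (l : List Char) (hl : l ≠ []) :
    ∃ m' : Nat, m' < l.length ∧
      ((PySem.List.pyRange 1 (l.length : Int) 1).foldl
        (fun m i => aWhile l (l.length : Int) i m l.length 0) 0) = (m' : Int) ∧
      ∀ k : Nat, k < l.length → rot l k ≤ rot l m' := by
  have hn : 1 ≤ l.length := List.length_pos_iff.mpr hl
  suffices h : ∀ b : Nat, 1 ≤ b → b ≤ l.length →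
      ∃ m' : Nat, m' < b ∧
        ((PySem.List.pyRange 1 (b : Int) 1).foldl
          (fun m i => aWhile l (l.length : Int) i m l.length 0) 0) = (m' : Int) ∧
        ∀ k : Nat, k < b → rot l k ≤ rot l m' by
    obtain ⟨m', h1, h2, h3⟩ := h l.length hn le_rfl
    exact ⟨m', h1, h2, h3⟩
  intro b hb1 hb2
  induction b with
  | zero => omega
  | succ b ih =>
    by_cases hb : 1 ≤ b
    · obtain ⟨m', h1, h2, h3⟩ := ih hb (by omega)
      have hsplit : PySem.List.pyRange 1 ((b : Int) + 1) 1
          = PySem.List.pyRange 1 (b : Int) 1 ++ [(b : Int)] :=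
        PySem.List.pyRange_one_succ_right (by exact_mod_cast hb)
      have hcast : (((b : Nat) + 1 : Nat) : Int) = (b : Int) + 1 := by push_cast; ring
      rw [hcast, hsplit, List.foldl_append, h2]
      simp only [List.foldl_cons, List.foldl_nil]
      rw [aWhile_step l b m' (by omega) (by omega)]
      by_cases hcmp : rot l m' < rot l b
      · refine ⟨b, by omega, by rw [if_pos hcmp], ?_⟩
        intro k hk
        rcases Nat.lt_succ_iff_lt_or_eq.mp hk with h | h
        · exact le_trans (h3 k h) (le_of_lt hcmp)
        · subst h; exact le_rfl
      · refine ⟨m', by omega, by rw [if_neg hcmp], ?_⟩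
        intro k hk
        rcases Nat.lt_succ_iff_lt_or_eq.mp hk with h | h
        · exact h3 k h
        · subst h; exact not_lt.mp hcmp
    · have hb0 : b = 0 := by omega
      subst hb0
      refine ⟨0, by omega, ?_, ?_⟩
      · rw [show (((0:Nat) + 1 : Nat) : Int) = 1 by simp,
          PySem.List.pyRange_one_eq_nil le_rfl]
        simp
      · intro k hk
        have : k = 0 := by omega
        subst this; exact le_rfl

-- B's list of rotation strings, in list form
theorem rots_eq (l : List Char) :
    (PySem.List.pyRange 0 (PySem.List.len l) 1).map
      (fun i => String.ofList (PySem.List.slice l (some i) none ++ PySem.List.slice l none (some i)))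
    = (List.range l.length).map (fun k => String.ofList (rot l k)) := by
  rw [PySem.List.len_eq, PySem.List.pyRange_one, List.map_map]
  simp [Function.comp, PySem.List.slice_from_natCast, PySem.List.slice_to_natCast, rot]

-- B returns the rotation at any arg-max index (all maxima are equal strings)
theorem alt_eq_max (s : String) (m' : Nat) (hm : m' < s.toList.length)
    (hmax : ∀ k : Nat, k < s.toList.length → rot s.toList k ≤ rot s.toList m') :
    canon_ring_py_alt s = String.ofList (rot s.toList m') := by
  simp only [canon_ring_py_alt]
  rw [rots_eq]
  set rots := (List.range s.toList.length).map (fun k => String.ofList (rot s.toList k)) with hrots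
  have hmem : String.ofList (rot s.toList m') ∈ rots := by
    rw [hrots]; exact List.mem_map_of_mem (List.mem_range.mpr hm)
  have hne : rots ≠ [] := List.ne_nil_of_mem hmem
  obtain ⟨z, hz⟩ : ∃ z, PySem.List.max? rots (fun r => r) = some z := by
    rcases h : PySem.List.max? rots (fun r => r) with _ | z
    · exact absurd ((PySem.List.max?_eq_none_iff _ _).mp h) hne
    · exact ⟨z, rfl⟩
  obtain ⟨k₀, hk₀, hzeq⟩ : ∃ k₀, k₀ < s.toList.length ∧ z = String.ofList (rot s.toList k₀) := by
    have hzmem := PySem.List.max?_mem hz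
    rw [hrots] at hzmem
    obtain ⟨k₀, hk₀, hzeq⟩ := List.mem_map.mp hzmem
    exact ⟨k₀, List.mem_range.mp hk₀, hzeq.symm⟩
  have h1 : String.ofList (rot s.toList m') ≤ z := PySem.List.max?_isMax hz _ hmem
  have h2 : z ≤ String.ofList (rot s.toList m') := by
    rw [hzeq, String.le_iff_toList_le, String.toList_ofList, String.toList_ofList]
    exact hmax k₀ hk₀
  rw [PySem.List.maxD, hz]
  exact le_antisymm h2 h1

-- ===== VERDICT (by name: the statement is the Claim_ definition above) =====
theorem canon_ring_py_spec : Claim_equal_canon_ring_py := by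
  intro s _
  unfold Spec_canon_ring_py
  by_cases hl : s.toList = []
  · have hs : s = String.ofList s.toList := String.ofList_toList.symm
    simp only [canon_ring_py, canon_ring_py_alt, hl]
    simp [PySem.List.pyRange_one_eq_nil, PySem.List.maxD, PySem.List.max?, PySem.List.slice]
    rw [hs, hl]
  · obtain ⟨m', hm, hfold, hmax⟩ := fold_argmax s.toList hl
    simp only [canon_ring_py, PySem.List.len_eq, Int.toNat_natCast]
    rw [hfold, PySem.List.slice_from_natCast, PySem.List.slice_to_natCast,
      alt_eq_max s m' hm hmax]
    rfl
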